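-- pv_equiv track=rewrite | github.com/Chispins/Automatic_Report_Generation | atenot2.py | trim_at_first_repeat
-- ===== SOURCE A (Python) =====
-- def trim_at_first_repeat(text):
--     if not isinstance(text, str):
--         return text
--     words = text.split()
--     seen = set()
--     result = []
--     for word in words:
--         if word in seen:
--             break
--         seen.add(word)
--         result.append(word)
--     return ' '.join(result)
-- ===== SOURCE B (Python) =====
-- def trim_at_first_repeat(text):
--     if not isinstance(text, str):
--         return text
--     words = text.split()
--     first = {}
--     for i, w in enumerate(words):
--         if w not in first:
--             first[w] = i
--     cutoff = min((i for i, w in enumerate(words) if first[w] < i), default=len(words))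
--     return ' '.join(words[:cutoff])
-- ===== Notes on version B (the rewrite author's own statement) =====
-- stated objective: alternative
-- what changed: Replaces the single break-on-repeat scan with two staged passes: first build a dict mapping each word to its first-occurrence index, then compute the cutoff as the minimum enumerated index whose word's recorded first index is smaller (default len(words)) and slice-and-join once; no seen-set, no result accumulator, no break.
import Mathlib
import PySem

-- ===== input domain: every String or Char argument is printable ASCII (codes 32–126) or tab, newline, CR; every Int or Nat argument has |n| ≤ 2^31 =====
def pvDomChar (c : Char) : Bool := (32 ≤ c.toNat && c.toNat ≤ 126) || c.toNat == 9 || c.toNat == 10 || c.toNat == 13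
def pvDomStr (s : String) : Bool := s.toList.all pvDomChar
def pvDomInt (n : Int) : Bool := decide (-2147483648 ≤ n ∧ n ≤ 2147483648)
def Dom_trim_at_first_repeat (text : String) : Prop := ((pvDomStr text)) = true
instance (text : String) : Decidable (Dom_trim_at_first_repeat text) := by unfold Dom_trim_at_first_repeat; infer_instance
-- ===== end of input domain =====

-- B is a staged re-decomposition (objective: alternative, same cost): pass 1 builds a dict of each
-- word's first-occurrence index, pass 2 takes the minimum index whose word has a smaller recorded
-- first index (default len), then one slice-and-join — no seen-set, no accumulator, no break.
-- (Python A's `isinstance` guard is vacuous here: the Lean signature fixes text : String.)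

-- ===== PORT A =====
-- the for-loop with `break`, carrying the seen set and the result list
def pvLoopA (ws : List String) (seen : PySem.Set String) (result : List String) : List String :=
  match ws with
  | [] => result
  | w :: rest =>
    if PySem.Set.contains seen w then result
    else pvLoopA rest (PySem.Set.add seen w) (result ++ [w])

def trim_at_first_repeat (text : String) : String :=
  PySem.Str.join " " (pvLoopA (PySem.Str.split₀ text) PySem.Set.empty [])

-- ===== PORT B =====
-- pass 1 of Source B: `for i, w in enumerate(words): if w not in first: first[w] = i`
def pvFirstIdx (pairs : List (Int × String)) (first : PySem.Dict String Int) : PySem.Dict String Int :=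
  pairs.foldl (fun d p => if d.contains p.2 then d else d.insert p.2 p.1) first

def trim_at_first_repeat_alt (text : String) : String :=
  let words := PySem.Str.split₀ text
  let first := pvFirstIdx (PySem.List.enumerate words 0) PySem.Dict.empty
  -- `first[w]` never raises (every word of `words` is a key); `getD p.2 p.1` reads that entry
  let cutoff := PySem.List.minD
      (((PySem.List.enumerate words 0).filter
          (fun p => decide (first.getD p.2 p.1 < p.1))).map Prod.fst)
      (fun x => x) ((words.length : Int))
  PySem.Str.join " " (PySem.List.slice words none (some cutoff))

-- ===== PRECONDITION & SPEC =====
def Spec_trim_at_first_repeat (text : String) (out : String) : Prop := out = trim_at_first_repeat_alt text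
instance (text : String) (out : String) : Decidable (Spec_trim_at_first_repeat text out) := by unfold Spec_trim_at_first_repeat; infer_instance

-- ===== CLAIM (what is proved, stated in full; the proofs are below) =====
def Claim_equal_trim_at_first_repeat : Prop := ∀ (text : String), Dom_trim_at_first_repeat text → Spec_trim_at_first_repeat text (trim_at_first_repeat text)

-- ===== LEMMAS AND PROOFS =====

-- length of the duplicate-free prefix of ws relative to `seen`
def pvFirstRep (seen : PySem.Set String) : List String → Nat
  | [] => 0
  | w :: rest =>
    if PySem.Set.contains seen w then 0 else pvFirstRep (PySem.Set.add seen w) rest + 1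

theorem pvLoopA_eq_take (ws : List String) (seen : PySem.Set String) (result : List String) :
    pvLoopA ws seen result = result ++ ws.take (pvFirstRep seen ws) := by
  induction ws generalizing seen result with
  | nil => simp [pvLoopA, pvFirstRep]
  | cons w rest ih =>
    by_cases h : w ∈ seen
    · simp [pvLoopA, pvFirstRep, h]
    · simp [pvLoopA, pvFirstRep, h, ih]

-- pass 1 computes the first-occurrence index of every word
theorem pvFirstIdx_get? (rest : List String) (s : Int) (d : PySem.Dict String Int) (w : String) :
    (pvFirstIdx (PySem.List.enumerate rest s) d).get? w =
      if d.contains w then d.get? w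
      else (PySem.List.index? rest w).map (fun j => s + (j : Int)) := by
  induction rest generalizing s d with
  | nil =>
    by_cases h : d.contains w <;>
      simp [pvFirstIdx, PySem.List.enumerate_nil, h, PySem.Dict.get?_eq_none_iff_contains]
  | cons w0 r ih =>
    rw [PySem.List.enumerate_cons]
    show (pvFirstIdx (PySem.List.enumerate r (s + 1))
        (if d.contains w0 then d else d.insert w0 s)).get? w = _
    by_cases hc : d.contains w0
    · rw [if_pos hc, ih]
      by_cases hw : d.contains w
      · simp [hw]
      · have hne : w0 ≠ w := by rintro rfl; exact absurd hc (by simp [hw])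
        rw [if_neg (by simp [hw]), if_neg (by simp [hw]),
          PySem.List.index?_cons_of_ne r hne]
        cases PySem.List.index? r w <;> simp <;> omega
    · rw [if_neg hc, ih]
      by_cases he : w = w0
      · subst he
        rw [if_pos (by simp [PySem.Dict.contains_insert_self]), if_neg hc,
          PySem.Dict.get?_insert_self, PySem.List.index?_cons_self]
        simp
      · rw [PySem.Dict.contains_insert, PySem.Dict.get?_insert_of_ne d s he,
          PySem.List.index?_cons_of_ne r (fun h => he h.symm)]
        have : (w == w0) = false := by simp [he]
        rw [this]
        by_cases hw : d.contains w
        · simp [hw]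
        · simp only [hw, Bool.false_eq_true, if_false]
          cases PySem.List.index? r w <;> simp <;> omega

-- the dict condition at position k says: the word already occurs strictly earlier
theorem pvCond_iff (ws : List String) (k : Nat) (hk : k < ws.length) :
    ((pvFirstIdx (PySem.List.enumerate ws 0) PySem.Dict.empty).getD ws[k] (k : Int) < (k : Int))
      ↔ ws[k] ∈ ws.take k := by
  have hmem : ws[k] ∈ ws := List.getElem_mem hk
  obtain ⟨j, hj⟩ : ∃ j, PySem.List.index? ws ws[k] = some j := by
    have := (PySem.List.index?_isSome_iff (xs := ws) (v := ws[k])).mpr hmem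
    exact Option.isSome_iff_exists.mp this
  obtain ⟨hjlen, hjv, hjmin⟩ := PySem.List.getElem_of_index?_eq_some hj
  have hget : (pvFirstIdx (PySem.List.enumerate ws 0) PySem.Dict.empty).get? ws[k] = some (j : Int) := by
    rw [pvFirstIdx_get?, if_neg (by simp [PySem.Dict.contains_empty]), hj]
    simp
  rw [PySem.Dict.getD_eq_get?_getD, hget]
  simp only [Option.getD_some]
  constructor
  · intro hlt
    have hjk : j < k := by exact_mod_cast hlt
    rw [List.mem_take_iff_getElem]
    exact ⟨j, by omega, by simpa using hjv⟩
  · intro hmem'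
    rw [List.mem_take_iff_getElem] at hmem'
    obtain ⟨i, hi, he⟩ := hmem'
    have hilen : i < ws.length := by simp at hi; omega
    have hik : i < k := by simp at hi; omega
    have hwi : ws[i] = ws[k] := he
    have : j ≤ i := by
      by_contra hcon
      exact hjmin i (by omega) hwi
    exact_mod_cast by omega

-- find? = head-of-filter for the cutoff; the find?-level value (adapted induction over a growing prefix)
theorem pvFind_eq (ws pre : List String) :
    (((PySem.List.enumerate ws (pre.length : Int)).find?
        (fun p => decide (p.2 ∈ (pre ++ ws).take p.1.toNat))).map Prod.fst).getD
      (((pre ++ ws).length : Nat) : Int)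
    = ((pre.length + pvFirstRep (PySem.Set.ofList pre) ws : Nat) : Int) := by
  induction ws generalizing pre with
  | nil => simp [PySem.List.enumerate_nil, pvFirstRep]
  | cons w rest ih =>
    rw [PySem.List.enumerate_cons]
    by_cases h : w ∈ pre
    · rw [List.find?_cons_of_pos (by simp [h])]
      simp [pvFirstRep, h, PySem.Set.mem_ofList]
    · rw [List.find?_cons_of_neg (by simp [h])]
      have happ : pre ++ w :: rest = (pre ++ [w]) ++ rest := by simp
      have hlen : ((pre.length : Int) + 1) = (((pre ++ [w]).length : Nat) : Int) := by simp
      rw [happ, hlen, ih (pre ++ [w]), PySem.Set.ofList_append_singleton]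
      have hstep : pvFirstRep (PySem.Set.ofList pre) (w :: rest)
          = pvFirstRep ((PySem.Set.ofList pre).add w) rest + 1 := by
        simp [pvFirstRep, PySem.Set.mem_ofList, h]
      rw [hstep, Nat.cast_inj, List.length_append]
      simp
      omega

-- a foldl-min over a list whose elements all exceed the seed returns the seed
theorem pvFoldlMin_of_le (x : Int) (t : List Int) (h : ∀ y ∈ t, x ≤ y) :
    t.foldl min x = x := by
  induction t with
  | nil => rfl
  | cons y r ih =>
    have hx : min x y = x := min_eq_left (h y (by simp))
    simp only [List.foldl_cons, hx]
    exact ih (fun z hz => h z (by simp [hz]))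

-- minD over the fst-projection of a filtered index list with strictly increasing indices = find?
theorem pvMinD_filter (p : Int × String → Bool) (l : List (Int × String))
    (hl : l.Pairwise (fun a b => a.1 < b.1)) (d : Int) :
    PySem.List.minD ((l.filter p).map Prod.fst) (fun x => x) d
      = ((l.find? p).map Prod.fst).getD d := by
  rw [← List.head?_filter]
  cases hfp : l.filter p with
  | nil => simp [PySem.List.minD, PySem.List.min?]
  | cons a s =>
    have hml : ((a :: s).map Prod.fst).Pairwise (fun x y => x < y) :=
      List.Pairwise.map _ (fun _ _ h => h) (hfp ▸ hl.filter p)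
    simp only [List.map_cons] at hml ⊢
    unfold PySem.List.minD
    rw [PySem.List.min?_id_cons, pvFoldlMin_of_le a.1 (s.map Prod.fst)
        (fun y hy => le_of_lt ((List.pairwise_cons.mp hml).1 y hy))]
    simp

theorem pvFind_congr {α : Type} (p q : α → Bool) (l : List α) (h : ∀ x ∈ l, p x = q x) :
    l.find? p = l.find? q := by
  induction l with
  | nil => rfl
  | cons x t ih =>
    have hx := h x (by simp)
    by_cases hp : p x = true
    · rw [List.find?_cons_of_pos hp, List.find?_cons_of_pos (hx ▸ hp)]
    · rw [List.find?_cons_of_neg hp, List.find?_cons_of_neg (by rw [← hx]; exact hp)]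
      exact ih (fun y hy => h y (by simp [hy]))

theorem trim_eq (text : String) :
    trim_at_first_repeat text = trim_at_first_repeat_alt text := by
  have halt : trim_at_first_repeat_alt text =
      PySem.Str.join " "
        (PySem.List.slice (PySem.Str.split₀ text) none
          (some (PySem.List.minD
            (((PySem.List.enumerate (PySem.Str.split₀ text) 0).filter
                (fun p => decide ((pvFirstIdx (PySem.List.enumerate (PySem.Str.split₀ text) 0)
                    PySem.Dict.empty).getD p.2 p.1 < p.1))).map Prod.fst)
            (fun x => x) (((PySem.Str.split₀ text).length : Nat) : Int)))) := rfl
  unfold trim_at_first_repeat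
  rw [halt, pvLoopA_eq_take]
  set ws := PySem.Str.split₀ text with hws
  -- B's dict predicate agrees with the take-membership predicate on every enumerated pair
  have hcong : (PySem.List.enumerate ws 0).find?
        (fun p => decide ((pvFirstIdx (PySem.List.enumerate ws 0) PySem.Dict.empty).getD p.2 p.1 < p.1))
      = (PySem.List.enumerate ws 0).find? (fun p => decide (p.2 ∈ ([] ++ ws).take p.1.toNat)) := by
    apply pvFind_congr
    intro p hp
    rw [PySem.List.mem_enumerate_iff] at hp
    obtain ⟨k, hk, rfl⟩ := hp
    simp only [List.nil_append, zero_add, Int.toNat_natCast]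
    exact decide_eq_decide.mpr (pvCond_iff ws k hk)
  rw [pvMinD_filter _ _ (PySem.List.pairwise_lt_enumerate ws 0), hcong]
  have h := pvFind_eq ws []
  simp only [List.nil_append, List.length_nil, Nat.zero_add, Nat.cast_zero] at h
  simp only [List.nil_append]
  rw [h, PySem.List.slice_to_natCast]
  simp [PySem.Set.ofList]

-- ===== VERDICT (by name: the statement is the Claim_ definition above) =====
theorem trim_at_first_repeat_spec : Claim_equal_trim_at_first_repeat := by
  intro text _
  unfold Spec_trim_at_first_repeat
  exact trim_eq text
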